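-- pv_equiv track=rewrite | github.com/kirillyat/itmo-algo | contest/B.py | countinvers
-- ===== SOURCE A (Python) =====
-- from typing import List
--
-- def countinvers(arr: List[int]):
--     count = 0
--     k = 0
--     for i in range(1, len(arr)):
--         if arr[i - 1] > arr[i]:
--             if count == 0:
--                 count = 1
--             k+=1
--             count *= k
--
--     return count
-- ===== SOURCE B (Python) =====
-- from typing import List
--
-- def _fact(n: int) -> int:
--     p = 1
--     for i in range(2, n + 1):
--         p *= i
--     return p
--
-- def countinvers(arr: List[int]):
--     d = sum(1 for a, b in zip(arr, arr[1:]) if a > b)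
--     return 0 if d == 0 else _fact(d)
-- ===== Notes on version B (the rewrite author's own statement) =====
-- stated objective: simpler
-- what changed: B counts adjacent descents with a one-line sum over zipped neighbour pairs and then computes the factorial separately (recursively), instead of A's single index loop that interleaves descent counting with maintaining a running factorial; A's quirk that zero descents yields 0 (not 1) is preserved.
import Mathlib
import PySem

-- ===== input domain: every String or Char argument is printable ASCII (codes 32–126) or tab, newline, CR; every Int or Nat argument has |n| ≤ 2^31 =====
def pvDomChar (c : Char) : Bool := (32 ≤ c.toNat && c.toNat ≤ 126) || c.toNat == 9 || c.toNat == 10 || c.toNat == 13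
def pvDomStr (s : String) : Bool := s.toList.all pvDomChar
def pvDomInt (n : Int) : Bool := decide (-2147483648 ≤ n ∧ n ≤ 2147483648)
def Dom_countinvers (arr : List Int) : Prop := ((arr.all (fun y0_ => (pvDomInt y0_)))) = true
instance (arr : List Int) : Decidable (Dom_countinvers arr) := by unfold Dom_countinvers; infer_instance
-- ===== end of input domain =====

-- B splits A's single interleaved loop into a neighbour-pair descent count plus a separate recursive factorial; simpler decomposition, same values.


-- ===== PORT A =====
-- A's loop step: state (count, k); for index i, compare arr[i-1] with arr[i]
def pvStepA (l : List Int) (s : Int × Int) (i : Int) : Int × Int :=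
  if PySem.List.pyGetD l (i - 1) 0 > PySem.List.pyGetD l i 0 then
    ((if s.1 = 0 then 1 else s.1) * (s.2 + 1), s.2 + 1)
  else s

def countinvers (arr : List Int) : Int :=
  ((PySem.List.pyRange 1 arr.length 1).foldl (pvStepA arr) (0, 0)).1

-- ===== PORT B =====
-- iterative factorial, as _fact in Source B
def pvFact (n : Int) : Int :=
  (PySem.List.pyRange 2 (n + 1) 1).foldl (fun p i => p * i) 1

def countinvers_alt (arr : List Int) : Int :=
  let d : Int := ((arr.zip (arr.drop 1)).filter (fun p => p.1 > p.2)).map (fun _ => (1 : Int)) |>.sum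
  if d = 0 then 0 else pvFact d

-- ===== PRECONDITION & SPEC =====
def Spec_countinvers (arr : List Int) (out : Int) : Prop := out = countinvers_alt arr
instance (arr : List Int) (out : Int) : Decidable (Spec_countinvers arr out) := by unfold Spec_countinvers; infer_instance

-- ===== CLAIM (what is proved, stated in full; the proofs are below) =====
def Claim_equal_countinvers : Prop := ∀ (arr : List Int), Dom_countinvers arr → Spec_countinvers arr (countinvers arr)

-- ===== LEMMAS AND PROOFS =====

-- factorial on Nat, the invariant's yardstick
def pvFactN : Nat → Int
  | 0 => 1
  | n + 1 => pvFactN n * (n + 1)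

-- step on an adjacent pair, independent of the list
def pvStepP (s : Int × Int) (p : Int × Int) : Int × Int :=
  if p.1 > p.2 then ((if s.1 = 0 then 1 else s.1) * (s.2 + 1), s.2 + 1) else s

lemma pvGetD_cons_pos (x : Int) (l : List Int) (i : Int) (h : 1 ≤ i) :
    PySem.List.pyGetD (x :: l) i 0 = PySem.List.pyGetD l (i - 1) 0 := by
  simp only [PySem.List.pyGetD, PySem.List.pyGet?, PySem.List.pyIdx?]
  have h0 : ¬ i < 0 := by omega
  have h1 : ¬ i - 1 < 0 := by omega
  simp only [List.length_cons]
  split_ifs with h2 h3 h3 <;>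
    first
    | rfl
    | (exfalso; omega)
    | (have h4 : i.toNat = (i - 1).toNat + 1 := by omega
       rw [h4]
       simp)

lemma pvShift (x : Int) (l : List Int) (a : Int) (ha : 1 ≤ a) (s : Int × Int) :
    (PySem.List.pyRange (a + 1) ((l.length : Int) + 1) 1).foldl (pvStepA (x :: l)) s
      = (PySem.List.pyRange a (l.length : Int) 1).foldl (pvStepA l) s := by
  rw [PySem.List.pyRange_one, PySem.List.pyRange_one]
  have hlen : ((l.length : Int) + 1 - (a + 1)).toNat = ((l.length : Int) - a).toNat := by omega
  rw [hlen, List.foldl_map, List.foldl_map]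
  have : (fun (t : Int × Int) (k : Nat) => pvStepA (x :: l) t (a + 1 + (k : Int)))
       = (fun (t : Int × Int) (k : Nat) => pvStepA l t (a + (k : Int))) := by
    funext t k
    unfold pvStepA
    have h1 : PySem.List.pyGetD (x :: l) (a + 1 + (k : Int)) 0
        = PySem.List.pyGetD l (a + (k : Int)) 0 := by
      rw [pvGetD_cons_pos x l _ (by omega)]; ring_nf
    have h2 : PySem.List.pyGetD (x :: l) (a + 1 + (k : Int) - 1) 0
        = PySem.List.pyGetD l (a + (k : Int) - 1) 0 := by
      rw [pvGetD_cons_pos x l _ (by omega)]; ring_nf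
    rw [h1, h2]
  rw [this]

-- A's index fold equals the fold over adjacent pairs
lemma pvA_pairs : ∀ (l : List Int) (s : Int × Int),
    (PySem.List.pyRange 1 (l.length : Int) 1).foldl (pvStepA l) s
      = (l.zip (l.drop 1)).foldl pvStepP s
  | [], s => by simp [PySem.List.pyRange_one_eq_nil]
  | [x], s => by simp [PySem.List.pyRange_one_eq_nil]
  | x :: y :: t, s => by
    have hb : (1 : Int) < ((x :: y :: t).length : Int) := by
      simp only [List.length_cons]; push_cast; omega
    rw [PySem.List.pyRange_one_cons hb, List.foldl_cons]
    have hfirst : pvStepA (x :: y :: t) s 1 = pvStepP s (x, y) := by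
      simp [pvStepA, pvStepP, PySem.List.pyGetD, PySem.List.pyGet?, PySem.List.pyIdx?,
        show (0 : Int) ≤ (t.length : Int) + 1 from by positivity]
    rw [hfirst]
    have hlen : ((x :: y :: t).length : Int) = (((y :: t).length : Int)) + 1 := by
      simp
    rw [hlen, pvShift x (y :: t) 1 (le_refl 1) (pvStepP s (x, y)),
        pvA_pairs (y :: t) (pvStepP s (x, y)),
        show (x :: y :: t).zip ((x :: y :: t).drop 1)
          = (x, y) :: ((y :: t).zip ((y :: t).drop 1)) by simp,
        List.foldl_cons]

lemma pvFactN_ne_zero : ∀ (m : Nat), pvFactN m ≠ 0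
  | 0 => by simp [pvFactN]
  | n + 1 => by
    simp only [pvFactN]
    exact mul_ne_zero (pvFactN_ne_zero n) (by omega)

-- loop invariant: state is (0-or-factorial, descent count)
lemma pvInvariant : ∀ (ps : List (Int × Int)) (k : Nat),
    ps.foldl pvStepP ((if k = 0 then 0 else pvFactN k), (k : Int))
      = ((if k + ps.countP (fun p => decide (p.1 > p.2)) = 0 then 0
          else pvFactN (k + ps.countP (fun p => decide (p.1 > p.2)))),
         ((k + ps.countP (fun p => decide (p.1 > p.2)) : Nat) : Int))
  | [], k => by simp
  | p :: ps, k => by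
    rw [List.foldl_cons]
    by_cases h : p.1 > p.2
    · have hstep : pvStepP ((if k = 0 then 0 else pvFactN k), (k : Int)) p
          = ((if k + 1 = 0 then 0 else pvFactN (k + 1)), ((k + 1 : Nat) : Int)) := by
        unfold pvStepP
        rw [if_pos h]
        rcases Nat.eq_zero_or_pos k with hk | hk
        · subst hk; simp [pvFactN]
        · rw [if_neg (show ¬ k = 0 by omega), if_neg (pvFactN_ne_zero k),
              if_neg (show ¬ k + 1 = 0 by omega)]
          simp only [Prod.mk.injEq]
          exact ⟨by simp [pvFactN], by push_cast; ring⟩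
      rw [hstep, pvInvariant ps (k + 1)]
      have hc : (p :: ps).countP (fun q => decide (q.1 > q.2))
          = ps.countP (fun q => decide (q.1 > q.2)) + 1 := by
        simp [h]
      rw [hc]
      have he : k + 1 + ps.countP (fun q => decide (q.1 > q.2))
          = k + (ps.countP (fun q => decide (q.1 > q.2)) + 1) := by omega
      rw [he]
    · have hstep : pvStepP ((if k = 0 then 0 else pvFactN k), (k : Int)) p
          = ((if k = 0 then 0 else pvFactN k), (k : Int)) := by
        unfold pvStepP
        rw [if_neg h]
      rw [hstep, pvInvariant ps k]
      have hc : (p :: ps).countP (fun q => decide (q.1 > q.2))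
          = ps.countP (fun q => decide (q.1 > q.2)) := by
        simp [h]
      rw [hc]

-- B's sum of ones is countP; B's recursive factorial matches pvFactN on positives
lemma pvSum_ones (ps : List (Int × Int)) :
    ((ps.filter (fun p => p.1 > p.2)).map (fun _ => (1 : Int))).sum
      = ((ps.countP (fun p => decide (p.1 > p.2)) : Nat) : Int) := by
  induction ps with
  | nil => simp
  | cons p ps ih =>
    by_cases h : p.1 > p.2 <;>
      · simp [h, List.countP_eq_length_filter]
        try omega

lemma pvFact_eq : ∀ (n : Nat), pvFact ((n : Nat) : Int) = pvFactN n
  | 0 => by norm_num [pvFact, pvFactN, PySem.List.pyRange_one_eq_nil]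
  | 1 => by norm_num [pvFact, pvFactN, PySem.List.pyRange_one_eq_nil]
  | n + 2 => by
    have hb : (2 : Int) ≤ ((n + 2 : Nat) : Int) := by push_cast; omega
    simp only [pvFact]
    rw [PySem.List.pyRange_one_succ_right hb, List.foldl_append,
        List.foldl_cons, List.foldl_nil]
    rw [show ((n + 2 : Nat) : Int) = ((n + 1 : Nat) : Int) + 1 from by push_cast; ring]
    rw [show (PySem.List.pyRange 2 (((n + 1 : Nat) : Int) + 1)).foldl (fun p i => p * i) 1
          = pvFactN (n + 1) from pvFact_eq (n + 1)]
    show pvFactN (n + 1) * (((n + 1 : Nat) : Int) + 1) = pvFactN (n + 2)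
    simp only [pvFactN]

-- ===== VERDICT (by name: the statement is the Claim_ definition above) =====
theorem countinvers_spec : Claim_equal_countinvers := by
  intro arr _
  unfold Spec_countinvers countinvers countinvers_alt
  rw [show ((arr.length : Int)) = ((arr.length : Nat) : Int) from rfl]
  rw [pvA_pairs arr (0, 0)]
  have h0 : ((0 : Int), (0 : Int))
      = ((if (0 : Nat) = 0 then 0 else pvFactN 0), ((0 : Nat) : Int)) := by simp
  rw [h0, pvInvariant (arr.zip (arr.drop 1)) 0]
  simp only [Nat.zero_add]
  rw [pvSum_ones]
  set c := (arr.zip (arr.drop 1)).countP (fun p => decide (p.1 > p.2)) with hc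
  rcases Nat.eq_zero_or_pos c with h | h
  · simp [h]
  · rw [if_neg (show ¬ c = 0 by omega),
        if_neg (show ¬ ((c : Nat) : Int) = 0 by exact_mod_cast show ¬ c = 0 by omega)]
    exact (pvFact_eq c).symm
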